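-- pv_equiv track=rewrite | github.com/d13kotson/Tabletop_Unity | django/pdf_parsers.py | parse_capabilites
-- ===== SOURCE A (Python) =====
-- def parse_capabilites(capabilities_info):
--     movement = {
--         'overland': '',
--         'swimming': '',
--         'burrow': '',
--         'sky': '',
--         'levitate': '',
--         'teleport': ''
--     }
--     capabilities = capabilities_info.split(',')
--     for capability in capabilities:
--         info = capability.strip()
--         if info.startswith('Overland'):
--             movement['overland'] = info.split(' ')[1]
--         elif info.startswith('Swim'):
--             movement['swimming'] = info.split(' ')[1]
--         elif info.startswith('Burrow'):
--             movement['burrow'] = info.split(' ')[1]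
--         elif info.startswith('Sky'):
--             movement['sky'] = info.split(' ')[1]
--         elif info.startswith('Levitate'):
--             movement['levitate'] = info.split(' ')[1]
--         elif info.startswith('Teleport'):
--             movement['teleport'] = info.split(' ')[1]
--     return movement
-- ===== SOURCE B (Python) =====
-- def parse_capabilites(capabilities_info):
--     tokens = [t.strip() for t in capabilities_info.split(',')]
--
--     def find(prefix):
--         for t in reversed(tokens):
--             if t.startswith(prefix):
--                 return t.split(' ')[1]
--         return ''
--
--     return {
--         'overland': find('Overland'),
--         'swimming': find('Swim'),
--         'burrow': find('Burrow'),
--         'sky': find('Sky'),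
--         'levitate': find('Levitate'),
--         'teleport': find('Teleport'),
--     }
-- ===== Notes on version B (the rewrite author's own statement) =====
-- stated objective: alternative
-- what changed: Replaces A's single forward pass with an if-elif chain and in-place dict overwrites by six independent backward scans of the stripped tokens (last match wins), one per movement key.
import Mathlib
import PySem

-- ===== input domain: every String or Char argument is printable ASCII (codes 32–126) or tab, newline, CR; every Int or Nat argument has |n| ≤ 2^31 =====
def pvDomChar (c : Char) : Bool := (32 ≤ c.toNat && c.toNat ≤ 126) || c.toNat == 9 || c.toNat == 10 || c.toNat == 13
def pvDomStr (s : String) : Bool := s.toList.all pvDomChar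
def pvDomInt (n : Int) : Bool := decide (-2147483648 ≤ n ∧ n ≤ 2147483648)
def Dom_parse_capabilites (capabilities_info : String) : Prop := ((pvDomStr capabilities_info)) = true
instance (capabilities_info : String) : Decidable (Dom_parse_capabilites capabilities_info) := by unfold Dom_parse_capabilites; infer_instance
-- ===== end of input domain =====

-- B replaces A's single forward pass with an if-elif chain and in-place dict overwrites by six
-- independent backward scans (last match wins), one per movement kind; objective: alternative structure.

-- ===== PORT A =====
-- s.split(sep) for a non-empty literal sep (PySem.Str.split? is none only for sep = "")
def pvSplit (s sep : String) : List String := (PySem.Str.split? s sep).getD []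

-- loop body of A: strip the token, dispatch on the prefix, overwrite the dict entry
def pvAStep (d : PySem.Dict String String) (capability : String) : PySem.Dict String String :=
  let info := PySem.Str.strip capability
  if PySem.Str.startswith info "Overland" then
    d.insert "overland" (PySem.List.pyGetD (pvSplit info " ") 1 "")
  else if PySem.Str.startswith info "Swim" then
    d.insert "swimming" (PySem.List.pyGetD (pvSplit info " ") 1 "")
  else if PySem.Str.startswith info "Burrow" then
    d.insert "burrow" (PySem.List.pyGetD (pvSplit info " ") 1 "")
  else if PySem.Str.startswith info "Sky" then
    d.insert "sky" (PySem.List.pyGetD (pvSplit info " ") 1 "")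
  else if PySem.Str.startswith info "Levitate" then
    d.insert "levitate" (PySem.List.pyGetD (pvSplit info " ") 1 "")
  else if PySem.Str.startswith info "Teleport" then
    d.insert "teleport" (PySem.List.pyGetD (pvSplit info " ") 1 "")
  else d

def parse_capabilites (capabilities_info : String) : List (String × String) :=
  let movement : PySem.Dict String String :=
    PySem.Dict.mk [("overland", ""), ("swimming", ""), ("burrow", ""),
                   ("sky", ""), ("levitate", ""), ("teleport", "")]
  let capabilities := pvSplit capabilities_info ","
  (capabilities.foldl pvAStep movement).items

-- ===== PORT B =====
-- backward scan: first token (of the already-reversed, stripped list) with the prefix wins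
def pvBFind (tokens : List String) (pfx : String) : String :=
  match tokens with
  | [] => ""
  | t :: ts =>
    if PySem.Str.startswith t pfx then PySem.List.pyGetD (pvSplit t " ") 1 ""
    else pvBFind ts pfx

def parse_capabilites_alt (capabilities_info : String) : List (String × String) :=
  let tokens := (pvSplit capabilities_info ",").map PySem.Str.strip
  let rtokens := tokens.reverse
  [("overland", pvBFind rtokens "Overland"),
   ("swimming", pvBFind rtokens "Swim"),
   ("burrow",   pvBFind rtokens "Burrow"),
   ("sky",      pvBFind rtokens "Sky"),
   ("levitate", pvBFind rtokens "Levitate"),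
   ("teleport", pvBFind rtokens "Teleport")]

-- ===== PRECONDITION & SPEC =====
-- Pre_ excludes exactly the inputs where A raises IndexError: a comma token whose stripped form
-- starts with one of the six movement prefixes but contains no space, so info.split(' ')[1] fails.
def Pre_parse_capabilites (capabilities_info : String) : Prop :=
  ∀ t ∈ pvSplit capabilities_info ",",
    (PySem.Str.startswith (PySem.Str.strip t) "Overland" = true ∨
     PySem.Str.startswith (PySem.Str.strip t) "Swim" = true ∨
     PySem.Str.startswith (PySem.Str.strip t) "Burrow" = true ∨
     PySem.Str.startswith (PySem.Str.strip t) "Sky" = true ∨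
     PySem.Str.startswith (PySem.Str.strip t) "Levitate" = true ∨
     PySem.Str.startswith (PySem.Str.strip t) "Teleport" = true) →
    2 ≤ (pvSplit (PySem.Str.strip t) " ").length
instance (capabilities_info : String) : Decidable (Pre_parse_capabilites capabilities_info) := by
  unfold Pre_parse_capabilites; infer_instance

def pvWitness_parse_capabilites : String := "Overland 30 ft., Swim 20 ft."

def Spec_parse_capabilites (capabilities_info : String) (out : List (String × String)) : Prop := out = parse_capabilites_alt capabilities_info
instance (capabilities_info : String) (out : List (String × String)) : Decidable (Spec_parse_capabilites capabilities_info out) := by unfold Spec_parse_capabilites; infer_instance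

-- ===== CLAIM (what is proved, stated in full; the proofs are below) =====
def Claim_equal_parse_capabilites : Prop := ∀ (capabilities_info : String), Dom_parse_capabilites capabilities_info → Pre_parse_capabilites capabilities_info → Spec_parse_capabilites capabilities_info (parse_capabilites capabilities_info)

-- ===== LEMMAS AND PROOFS =====

-- scan (for the proof): like pvBFind but over the raw tokens, stripping as it goes, with a default
def pvScanD (pfx : String) : List String → String → String
  | [], dflt => dflt
  | c :: cs, dflt =>
    let info := PySem.Str.strip c
    if PySem.Str.startswith info pfx then PySem.List.pyGetD (pvSplit info " ") 1 ""
    else pvScanD pfx cs dflt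

lemma pvScanD_append_singleton (pfx : String) (xs : List String) (c : String) (dflt : String) :
    pvScanD pfx (xs ++ [c]) dflt =
      pvScanD pfx xs
        (if PySem.Str.startswith (PySem.Str.strip c) pfx then
           PySem.List.pyGetD (pvSplit (PySem.Str.strip c) " ") 1 ""
         else dflt) := by
  induction xs with
  | nil => simp [pvScanD]
  | cons x xs ih => simp [pvScanD, ih]

lemma pvBFind_eq_scan (xs : List String) (pfx : String) :
    pvBFind (xs.map PySem.Str.strip) pfx = pvScanD pfx xs "" := by
  induction xs with
  | nil => rfl
  | cons x xs ih => simp [pvBFind, pvScanD, ih]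

lemma pvExcl {info p q : String} (hp : PySem.Str.startswith info p = true)
    (h1 : ¬ (p.toList <+: q.toList)) (h2 : ¬ (q.toList <+: p.toList)) :
    PySem.Str.startswith info q = false := by
  by_contra h
  have hq : PySem.Str.startswith info q = true := by
    cases hh : PySem.Str.startswith info q with
    | true => rfl
    | false => exact absurd hh h
  have hp' : p.toList <+: info.toList := (PySem.Chars.startswith_iff _ _).1 (by simpa using hp)
  have hq' : q.toList <+: info.toList := (PySem.Chars.startswith_iff _ _).1 (by simpa using hq)
  rcases List.prefix_or_prefix_of_prefix hp' hq' with h | h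
  · exact h1 h
  · exact h2 h

lemma pvLoop (caps : List String) : ∀ a b c d e f : String,
    caps.foldl pvAStep
      (PySem.Dict.mk [("overland", a), ("swimming", b), ("burrow", c),
                      ("sky", d), ("levitate", e), ("teleport", f)]) =
    PySem.Dict.mk [("overland", pvScanD "Overland" caps.reverse a),
                   ("swimming", pvScanD "Swim" caps.reverse b),
                   ("burrow",   pvScanD "Burrow" caps.reverse c),
                   ("sky",      pvScanD "Sky" caps.reverse d),
                   ("levitate", pvScanD "Levitate" caps.reverse e),
                   ("teleport", pvScanD "Teleport" caps.reverse f)] := by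
  induction caps with
  | nil => intro a b c d e f; rfl
  | cons t ts ih =>
    intro a b c d e f
    simp only [List.foldl_cons, List.reverse_cons, pvScanD_append_singleton, pvAStep]
    by_cases h1 : PySem.Str.startswith (PySem.Str.strip t) "Overland" = true
    · simp only [h1, pvExcl (q := "Swim") h1 (by decide) (by decide), pvExcl (q := "Burrow") h1 (by decide) (by decide), pvExcl (q := "Sky") h1 (by decide) (by decide), pvExcl (q := "Levitate") h1 (by decide) (by decide), pvExcl (q := "Teleport") h1 (by decide) (by decide), Bool.false_eq_true, if_true, if_false]
      rw [show (PySem.Dict.mk [("overland", a), ("swimming", b), ("burrow", c), ("sky", d), ("levitate", e), ("teleport", f)]).insert "overland" (PySem.List.pyGetD (pvSplit (PySem.Str.strip t) " ") 1 "") = PySem.Dict.mk [("overland", (PySem.List.pyGetD (pvSplit (PySem.Str.strip t) " ") 1 "")), ("swimming", b), ("burrow", c), ("sky", d), ("levitate", e), ("teleport", f)] from rfl]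
      exact ih _ b c d e f
    · by_cases h2 : PySem.Str.startswith (PySem.Str.strip t) "Swim" = true
      · have n1 : PySem.Str.startswith (PySem.Str.strip t) "Overland" = false := by simpa using h1
        simp only [h2, n1, pvExcl (q := "Burrow") h2 (by decide) (by decide), pvExcl (q := "Sky") h2 (by decide) (by decide), pvExcl (q := "Levitate") h2 (by decide) (by decide), pvExcl (q := "Teleport") h2 (by decide) (by decide), Bool.false_eq_true, if_true, if_false]
        rw [show (PySem.Dict.mk [("overland", a), ("swimming", b), ("burrow", c), ("sky", d), ("levitate", e), ("teleport", f)]).insert "swimming" (PySem.List.pyGetD (pvSplit (PySem.Str.strip t) " ") 1 "") = PySem.Dict.mk [("overland", a), ("swimming", (PySem.List.pyGetD (pvSplit (PySem.Str.strip t) " ") 1 "")), ("burrow", c), ("sky", d), ("levitate", e), ("teleport", f)] from rfl]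
        exact ih a _ c d e f
      · by_cases h3 : PySem.Str.startswith (PySem.Str.strip t) "Burrow" = true
        · have n1 : PySem.Str.startswith (PySem.Str.strip t) "Overland" = false := by simpa using h1
          have n2 : PySem.Str.startswith (PySem.Str.strip t) "Swim" = false := by simpa using h2
          simp only [h3, n1, n2, pvExcl (q := "Sky") h3 (by decide) (by decide), pvExcl (q := "Levitate") h3 (by decide) (by decide), pvExcl (q := "Teleport") h3 (by decide) (by decide), Bool.false_eq_true, if_true, if_false]
          rw [show (PySem.Dict.mk [("overland", a), ("swimming", b), ("burrow", c), ("sky", d), ("levitate", e), ("teleport", f)]).insert "burrow" (PySem.List.pyGetD (pvSplit (PySem.Str.strip t) " ") 1 "") = PySem.Dict.mk [("overland", a), ("swimming", b), ("burrow", (PySem.List.pyGetD (pvSplit (PySem.Str.strip t) " ") 1 "")), ("sky", d), ("levitate", e), ("teleport", f)] from rfl]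
          exact ih a b _ d e f
        · by_cases h4 : PySem.Str.startswith (PySem.Str.strip t) "Sky" = true
          · have n1 : PySem.Str.startswith (PySem.Str.strip t) "Overland" = false := by simpa using h1
            have n2 : PySem.Str.startswith (PySem.Str.strip t) "Swim" = false := by simpa using h2
            have n3 : PySem.Str.startswith (PySem.Str.strip t) "Burrow" = false := by simpa using h3
            simp only [h4, n1, n2, n3, pvExcl (q := "Levitate") h4 (by decide) (by decide), pvExcl (q := "Teleport") h4 (by decide) (by decide), Bool.false_eq_true, if_true, if_false]
            rw [show (PySem.Dict.mk [("overland", a), ("swimming", b), ("burrow", c), ("sky", d), ("levitate", e), ("teleport", f)]).insert "sky" (PySem.List.pyGetD (pvSplit (PySem.Str.strip t) " ") 1 "") = PySem.Dict.mk [("overland", a), ("swimming", b), ("burrow", c), ("sky", (PySem.List.pyGetD (pvSplit (PySem.Str.strip t) " ") 1 "")), ("levitate", e), ("teleport", f)] from rfl]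
            exact ih a b c _ e f
          · by_cases h5 : PySem.Str.startswith (PySem.Str.strip t) "Levitate" = true
            · have n1 : PySem.Str.startswith (PySem.Str.strip t) "Overland" = false := by simpa using h1
              have n2 : PySem.Str.startswith (PySem.Str.strip t) "Swim" = false := by simpa using h2
              have n3 : PySem.Str.startswith (PySem.Str.strip t) "Burrow" = false := by simpa using h3
              have n4 : PySem.Str.startswith (PySem.Str.strip t) "Sky" = false := by simpa using h4
              simp only [h5, n1, n2, n3, n4, pvExcl (q := "Teleport") h5 (by decide) (by decide), Bool.false_eq_true, if_true, if_false]
              rw [show (PySem.Dict.mk [("overland", a), ("swimming", b), ("burrow", c), ("sky", d), ("levitate", e), ("teleport", f)]).insert "levitate" (PySem.List.pyGetD (pvSplit (PySem.Str.strip t) " ") 1 "") = PySem.Dict.mk [("overland", a), ("swimming", b), ("burrow", c), ("sky", d), ("levitate", (PySem.List.pyGetD (pvSplit (PySem.Str.strip t) " ") 1 "")), ("teleport", f)] from rfl]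
              exact ih a b c d _ f
            · by_cases h6 : PySem.Str.startswith (PySem.Str.strip t) "Teleport" = true
              · have n1 : PySem.Str.startswith (PySem.Str.strip t) "Overland" = false := by simpa using h1
                have n2 : PySem.Str.startswith (PySem.Str.strip t) "Swim" = false := by simpa using h2
                have n3 : PySem.Str.startswith (PySem.Str.strip t) "Burrow" = false := by simpa using h3
                have n4 : PySem.Str.startswith (PySem.Str.strip t) "Sky" = false := by simpa using h4
                have n5 : PySem.Str.startswith (PySem.Str.strip t) "Levitate" = false := by simpa using h5
                simp only [h6, n1, n2, n3, n4, n5, Bool.false_eq_true, if_true, if_false]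
                rw [show (PySem.Dict.mk [("overland", a), ("swimming", b), ("burrow", c), ("sky", d), ("levitate", e), ("teleport", f)]).insert "teleport" (PySem.List.pyGetD (pvSplit (PySem.Str.strip t) " ") 1 "") = PySem.Dict.mk [("overland", a), ("swimming", b), ("burrow", c), ("sky", d), ("levitate", e), ("teleport", (PySem.List.pyGetD (pvSplit (PySem.Str.strip t) " ") 1 ""))] from rfl]
                exact ih a b c d e _
              · have n1 : PySem.Str.startswith (PySem.Str.strip t) "Overland" = false := by simpa using h1
                have n2 : PySem.Str.startswith (PySem.Str.strip t) "Swim" = false := by simpa using h2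
                have n3 : PySem.Str.startswith (PySem.Str.strip t) "Burrow" = false := by simpa using h3
                have n4 : PySem.Str.startswith (PySem.Str.strip t) "Sky" = false := by simpa using h4
                have n5 : PySem.Str.startswith (PySem.Str.strip t) "Levitate" = false := by simpa using h5
                have n6 : PySem.Str.startswith (PySem.Str.strip t) "Teleport" = false := by simpa using h6
                simp only [n1, n2, n3, n4, n5, n6, Bool.false_eq_true, if_false]
                exact ih a b c d e f

-- ===== VERDICT (by name: the statement is the Claim_ definition above) =====
theorem parse_capabilites_spec : Claim_equal_parse_capabilites := by
  intro s _ _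
  unfold Spec_parse_capabilites parse_capabilites parse_capabilites_alt
  dsimp only
  rw [pvLoop]
  simp only [← List.map_reverse, pvBFind_eq_scan]
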